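-- pv_equiv track=rewrite | github.com/Tesseractg/Gopher | src/ml/using_API/training.py | return_nonstring_col
-- ===== SOURCE A (Python) =====
-- def return_nonstring_col(columns):
--     cols_to_keep = []
--     train_cols = []
--     for column in columns:
--         if column != 'url' and column != 'host' and column != 'path':
--             cols_to_keep.append(column)
--             if column != 'label':
--                 train_cols.append(column)
--     return [cols_to_keep, train_cols]
-- ===== SOURCE B (Python) =====
-- def return_nonstring_col(columns):
--     # Delete-in-place algorithm: start from a full copy of columns and
--     # repeatedly remove unwanted values; train is derived from keep the same way.
--     keep = list(columns)
--     for bad in ('url', 'host', 'path'):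
--         while bad in keep:
--             keep.remove(bad)
--     train = list(keep)
--     while 'label' in train:
--         train.remove('label')
--     return [keep, train]
-- ===== Notes on version B (the rewrite author's own statement) =====
-- stated objective: alternative
-- what changed: Replaces A's single forward loop appending to two accumulators by a delete-in-place algorithm: copy the full columns list and repeatedly remove() each unwanted value until absent, then derive train the same way from keep by removing 'label'.
import Mathlib
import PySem

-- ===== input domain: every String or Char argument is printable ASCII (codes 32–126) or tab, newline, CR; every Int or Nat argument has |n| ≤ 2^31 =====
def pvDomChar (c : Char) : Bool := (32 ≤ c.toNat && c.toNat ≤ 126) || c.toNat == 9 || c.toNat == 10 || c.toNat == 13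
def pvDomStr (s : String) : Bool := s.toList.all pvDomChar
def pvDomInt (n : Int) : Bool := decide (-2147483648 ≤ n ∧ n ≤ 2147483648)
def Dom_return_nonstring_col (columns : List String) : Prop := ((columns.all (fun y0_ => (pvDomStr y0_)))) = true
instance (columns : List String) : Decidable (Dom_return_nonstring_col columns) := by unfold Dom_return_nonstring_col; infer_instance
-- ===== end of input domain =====

-- B replaces A's build-by-append loop by a delete-in-place algorithm (copy columns, repeatedly remove unwanted values); same values, alternative algorithm.


-- ===== PORT A =====
-- literal port of A's loop: one forward pass, both accumulators appended in lockstep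
def return_nonstring_col (columns : List String) : List (List String) :=
  let st := columns.foldl
    (fun (st : List String × List String) column =>
      if column ≠ "url" ∧ column ≠ "host" ∧ column ≠ "path" then
        (st.1 ++ [column], if column ≠ "label" then st.2 ++ [column] else st.2)
      else st)
    ([], [])
  [st.1, st.2]

-- ===== PORT B =====
-- the 'while v in xs: xs.remove(v)' loop: while v is a member, erase its first occurrence
-- (Python list.remove of a member = List.erase, exact per PySem.List.remove?_eq_some_erase)
def pvRemoveAll (xs : List String) (v : String) : List String :=
  if h : v ∈ xs then pvRemoveAll (xs.erase v) v else xs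
termination_by xs.length
decreasing_by
  have := List.length_erase_of_mem h
  have := List.length_pos_of_mem h
  omega

-- delete-in-place: copy columns, remove every 'url'/'host'/'path'; train derived from keep by removing 'label'
def return_nonstring_col_alt (columns : List String) : List (List String) :=
  let keep := ["url", "host", "path"].foldl (fun k bad => pvRemoveAll k bad) columns
  let train := pvRemoveAll keep "label"
  [keep, train]

-- ===== PRECONDITION & SPEC =====
def Spec_return_nonstring_col (columns : List String) (out : List (List String)) : Prop := out = return_nonstring_col_alt columns
instance (columns : List String) (out : List (List String)) : Decidable (Spec_return_nonstring_col columns out) := by unfold Spec_return_nonstring_col; infer_instance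

-- ===== CLAIM (what is proved, stated in full; the proofs are below) =====
def Claim_equal_return_nonstring_col : Prop := ∀ (columns : List String), Dom_return_nonstring_col columns → Spec_return_nonstring_col columns (return_nonstring_col columns)

-- ===== LEMMAS AND PROOFS =====
-- erasing the first v then filtering out v is the same as just filtering out v
theorem pv_filter_erase (xs : List String) (v : String) :
    (xs.erase v).filter (fun x => x ≠ v) = xs.filter (fun x => x ≠ v) := by
  induction xs with
  | nil => simp
  | cons x t ih =>
    by_cases hx : x = v
    · subst hx
      rw [List.erase_cons_head]
      simp [List.filter_cons]
    · rw [List.erase_cons_tail (by simp [hx]), List.filter_cons, List.filter_cons, ih]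

-- repeated removal of v equals filtering v out
theorem pvRemoveAll_eq_filter (xs : List String) (v : String) :
    pvRemoveAll xs v = xs.filter (fun x => x ≠ v) := by
  induction hn : xs.length using Nat.strong_induction_on generalizing xs with
  | _ n ih =>
    rw [pvRemoveAll]
    split_ifs with h
    · have h1 := List.length_erase_of_mem h
      have h2 := List.length_pos_of_mem h
      rw [ih (xs.erase v).length (by omega) _ rfl, pv_filter_erase]
    · symm
      rw [List.filter_eq_self]
      intro a ha
      simp only [ne_eq, decide_eq_true_eq]
      exact fun he => h (he ▸ ha)

-- loop invariant: A's fold with initial accumulators (k, t) appends the two filtered lists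
theorem return_nonstring_col_fold (columns : List String) (k t : List String) :
    columns.foldl
      (fun (st : List String × List String) column =>
        if column ≠ "url" ∧ column ≠ "host" ∧ column ≠ "path" then
          (st.1 ++ [column], if column ≠ "label" then st.2 ++ [column] else st.2)
        else st)
      (k, t)
    = (k ++ columns.filter (fun c => c ∉ ["url", "host", "path"]),
       t ++ (columns.filter (fun c => c ∉ ["url", "host", "path"])).filter (fun c => c ≠ "label")) := by
  induction columns generalizing k t with
  | nil => simp
  | cons c cs ih =>
    simp only [List.foldl_cons, List.filter_cons]
    by_cases h : c ≠ "url" ∧ c ≠ "host" ∧ c ≠ "path"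
    · rw [if_pos h]
      by_cases hl : c ≠ "label"
      · rw [if_pos hl, ih]
        simp_all
      · rw [if_neg hl, ih]
        simp_all
    · rw [if_neg h, ih]
      have hmem : ¬ (c ∉ ["url", "host", "path"]) := by
        simp only [List.mem_cons, List.not_mem_nil]
        tauto
      simp only [List.mem_cons, List.not_mem_nil, or_false] at hmem
      simp [hmem]

-- B's three chained removals equal the one membership filter
theorem pv_keep_eq (columns : List String) :
    ["url", "host", "path"].foldl (fun k bad => pvRemoveAll k bad) columns
    = columns.filter (fun c => c ∉ ["url", "host", "path"]) := by
  simp only [List.foldl_cons, List.foldl_nil, pvRemoveAll_eq_filter, List.filter_filter]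
  exact List.filter_congr (fun a _ => by
    by_cases h1 : a = "url" <;> by_cases h2 : a = "host" <;> by_cases h3 : a = "path" <;>
      simp [h1, h2, h3])

-- ===== VERDICT (by name: the statement is the Claim_ definition above) =====
theorem return_nonstring_col_spec : Claim_equal_return_nonstring_col := by
  intro columns _
  unfold Spec_return_nonstring_col return_nonstring_col return_nonstring_col_alt
  rw [return_nonstring_col_fold]
  rw [pv_keep_eq]
  simp [pvRemoveAll_eq_filter]
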